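-- pv_equiv track=rewrite | github.com/stonewell/learn-curve | src/strategy/strategy_base.py | lh_cross_n_days
-- ===== SOURCE A (Python) =====
-- def lh_cross_n_days(v1, v2, n):
--     for i in range(n - 1):
--         v = (
--             all(v1[x] >= v1[i] for x in range(i + 1, n))
--             and all(v1[x] >= v2[x] for x in range(i, n))
--             and max(v1[i:]) == v1[-1]
--             )
--
--         if v:
--             return True
--
--     return False
-- ===== SOURCE B (Python) =====
-- def lh_cross_n_days(v1, v2, n):
--     if n <= 1:
--         return False
--     last = v1[-1]
--     # suffix-max pass over the whole v1 (A's max(v1[i:]) runs to the end of v1):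
--     # after reversing, good3[i] == (max(v1[i:]) == v1[-1])
--     good3 = []
--     acc = None
--     for x in reversed(v1):
--         acc = x if acc is None else max(acc, x)
--         good3.append(acc == last)
--     good3.reverse()
--     # one backward pass over [0, n) maintaining the suffix min of v1 and the
--     # suffix all(v1[x] >= v2[x]) flag, so each index costs O(1)
--     ok = False
--     mn = None
--     ge = True
--     for i in reversed(range(n)):
--         ge = ge and v1[i] >= v2[i]
--         if i < n - 1 and v1[i] <= mn and ge and good3[i]:
--             ok = True
--         mn = v1[i] if mn is None else min(mn, v1[i])
--     return ok
-- ===== Notes on version B (the rewrite author's own statement) =====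
-- stated objective: faster
-- what changed: A rescans the suffix (two all() generators and a max of v1[i:]) for every candidate index, O(n^2); B precomputes a suffix-max table of v1 once and then makes a single backward pass over [0,n) maintaining the running suffix min of v1 and the running all(v1[x]>=v2[x]) flag, deciding each index in O(1).
-- outside the precondition, e.g. on lh_cross_n_days([0, 0], [1], 2): A returns False, B raises IndexError
import Mathlib
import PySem

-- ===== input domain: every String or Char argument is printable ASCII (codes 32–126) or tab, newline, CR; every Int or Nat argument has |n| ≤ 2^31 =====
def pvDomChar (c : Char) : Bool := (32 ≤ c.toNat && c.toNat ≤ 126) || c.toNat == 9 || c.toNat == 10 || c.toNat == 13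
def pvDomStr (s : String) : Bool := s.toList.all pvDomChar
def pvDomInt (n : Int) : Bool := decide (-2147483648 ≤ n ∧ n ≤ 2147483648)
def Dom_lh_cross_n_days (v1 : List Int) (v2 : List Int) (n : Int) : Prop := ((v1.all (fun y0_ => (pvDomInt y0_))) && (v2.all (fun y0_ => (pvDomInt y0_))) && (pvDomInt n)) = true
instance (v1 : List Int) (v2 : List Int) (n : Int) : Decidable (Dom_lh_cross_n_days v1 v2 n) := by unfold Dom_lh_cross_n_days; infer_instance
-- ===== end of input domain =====

-- ===== PORT A =====
-- B is an O(n + len(v1)) one-pass re-implementation of A's O(n^2) scan (suffix-max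
-- table + running suffix min / suffix all-ge flags); proved equal on Pre_.
def lh_cross_n_days (v1 : List Int) (v2 : List Int) (n : Int) : Bool :=
  -- for i in range(n-1): if (all ... and all ... and max(v1[i:]) == v1[-1]): return True; return False
  (PySem.List.pyRange 0 (n - 1) 1).any (fun i =>
    ((PySem.List.pyRange (i + 1) n 1).all (fun x =>
        decide (PySem.List.pyGetD v1 x 0 ≥ PySem.List.pyGetD v1 i 0)))
    && ((PySem.List.pyRange i n 1).all (fun x =>
        decide (PySem.List.pyGetD v1 x 0 ≥ PySem.List.pyGetD v2 x 0)))
    && (PySem.List.max? (PySem.List.slice v1 (some i) none) (fun y => y)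
        == some (PySem.List.pyGetD v1 (-1) 0)))

-- ===== PORT B =====
-- body of B's first loop: acc = x if acc is None else max(acc, x); good3.append(acc == last)
def pvStepG (last : Int) (s : Option Int × List Bool) (x : Int) : Option Int × List Bool :=
  let acc := match s.1 with | none => x | some a => max a x
  (some acc, s.2 ++ [acc == last])

-- body of B's second loop (state = (ok, mn, ge)); Python's `i < n-1 and v1[i] <= mn`
-- short-circuits, so mn (None only at i = n-1) is read via .getD 0 only when it is some
def pvStepM (v1 v2 : List Int) (good3 : List Bool) (n : Int)
    (s : Bool × Option Int × Bool) (i : Int) : Bool × Option Int × Bool :=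
  let ge := s.2.2 && decide (PySem.List.pyGetD v1 i 0 ≥ PySem.List.pyGetD v2 i 0)
  let ok := if decide (i < n - 1) && decide (PySem.List.pyGetD v1 i 0 ≤ s.2.1.getD 0)
               && ge && PySem.List.pyGetD good3 i false then true else s.1
  let mn := match s.2.1 with
    | none => PySem.List.pyGetD v1 i 0
    | some a => min a (PySem.List.pyGetD v1 i 0)
  (ok, some mn, ge)

def lh_cross_n_days_alt (v1 : List Int) (v2 : List Int) (n : Int) : Bool :=
  if n ≤ 1 then false
  else
    let last := PySem.List.pyGetD v1 (-1) 0
    let g := v1.reverse.foldl (pvStepG last) (none, [])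
    let good3 := g.2.reverse
    let r := (PySem.List.pyRange 0 n 1).reverse.foldl (pvStepM v1 v2 good3 n)
               (false, none, true)
    r.1

-- ===== PRECONDITION & SPEC =====
-- Pre_ excludes n > len(v1) or n > len(v2) (with n >= 2), where Python A raises
-- IndexError on most inputs and returns False on the rest only by accidental
-- generator short-circuiting; B naturally raises there.
def Pre_lh_cross_n_days (v1 : List Int) (v2 : List Int) (n : Int) : Prop :=
  n ≤ 1 ∨ (n ≤ (v1.length : Int) ∧ n ≤ (v2.length : Int))
instance (v1 : List Int) (v2 : List Int) (n : Int) : Decidable (Pre_lh_cross_n_days v1 v2 n) := by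
  unfold Pre_lh_cross_n_days; infer_instance

def pvWitness_lh_cross_n_days : List Int × List Int × Int := ([1, 2], [0, 0], 2)

def Spec_lh_cross_n_days (v1 : List Int) (v2 : List Int) (n : Int) (out : Bool) : Prop := out = lh_cross_n_days_alt v1 v2 n
instance (v1 : List Int) (v2 : List Int) (n : Int) (out : Bool) : Decidable (Spec_lh_cross_n_days v1 v2 n out) := by unfold Spec_lh_cross_n_days; infer_instance

-- ===== CLAIM (what is proved, stated in full; the proofs are below) =====
def Claim_equal_lh_cross_n_days : Prop := ∀ (v1 : List Int) (v2 : List Int) (n : Int), Dom_lh_cross_n_days v1 v2 n → Pre_lh_cross_n_days v1 v2 n → Spec_lh_cross_n_days v1 v2 n (lh_cross_n_days v1 v2 n)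

-- ===== LEMMAS AND PROOFS =====

-- running max/min of a nonempty list, as Python's max()/min() compute it
def pvRunMax : List Int → Option Int
  | [] => none
  | a :: t => some (t.foldl max a)

def pvRunMin : List Int → Option Int
  | [] => none
  | a :: t => some (t.foldl min a)

-- good3 in reverse-of-construction order: pvGrev last l [k] = (max(l[k:]) == last)
def pvGrev (last : Int) : List Int → List Bool
  | [] => []
  | a :: t => ((t.foldl max a) == last) :: pvGrev last t

theorem pv_foldl_max_comm (u : List Int) (c a : Int) :
    max (u.foldl max c) a = u.foldl max (max a c) := by
  induction u generalizing c with
  | nil => exact max_comm c a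
  | cons d u ih =>
      simp only [List.foldl]
      rw [ih (max c d)]
      ac_rfl

theorem pv_foldl_min_comm (u : List Int) (c a : Int) :
    min (u.foldl min c) a = u.foldl min (min a c) := by
  induction u generalizing c with
  | nil => exact min_comm c a
  | cons d u ih =>
      simp only [List.foldl]
      rw [ih (min c d)]
      ac_rfl

theorem pv_le_foldl_min_iff (c a : Int) (t : List Int) :
    c ≤ t.foldl min a ↔ (c ≤ a ∧ ∀ y ∈ t, c ≤ y) := by
  induction t generalizing a with
  | nil => simp
  | cons d t ih =>
      simp only [List.foldl, ih (min a d), le_min_iff, List.mem_cons]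
      constructor
      · rintro ⟨⟨h1, h2⟩, h3⟩
        exact ⟨h1, fun y hy => by rcases hy with rfl | hy; exact h2; exact h3 y hy⟩
      · rintro ⟨h1, h2⟩
        exact ⟨⟨h1, h2 d (Or.inl rfl)⟩, fun y hy => h2 y (Or.inr hy)⟩

-- characterization of B's first loop
theorem pv_foldG (last : Int) (l : List Int) :
    l.foldr (fun x s => pvStepG last s x) (none, []) =
      (pvRunMax l, (pvGrev last l).reverse) := by
  induction l with
  | nil => rfl
  | cons a t ih =>
      rw [List.foldr_cons, ih]
      cases t with
      | nil => rfl
      | cons c u =>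
          simp only [pvStepG, pvRunMax, pvGrev, List.reverse_cons, List.foldl]
          rw [pv_foldl_max_comm u c a]

-- indexing into pvGrev: works for every k (out of range gives false on both readings)
theorem pv_grev_getD (last : Int) (l : List Int) (k : Nat) :
    (pvGrev last l).getD k false =
      (match l.drop k with
       | [] => false
       | a :: t => ((t.foldl max a) == last)) := by
  induction l generalizing k with
  | nil => cases k <;> rfl
  | cons a t ih =>
      cases k with
      | zero => rfl
      | succ k => simpa [pvGrev] using ih k

-- specs of B's second loop components
def pvGeS (v1 v2 : List Int) (n a : Int) : Bool :=
  (PySem.List.pyRange a n 1).all (fun x =>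
    decide (PySem.List.pyGetD v1 x 0 ≥ PySem.List.pyGetD v2 x 0))

def pvMnS (v1 : List Int) (n a : Int) : Option Int :=
  pvRunMin ((PySem.List.pyRange a n 1).map (fun x => PySem.List.pyGetD v1 x 0))

def pvOkS (v1 v2 : List Int) (good3 : List Bool) (n a : Int) : Bool :=
  (PySem.List.pyRange a (n - 1) 1).any (fun i =>
    decide (i < n - 1)
    && decide (PySem.List.pyGetD v1 i 0 ≤ (pvMnS v1 n (i + 1)).getD 0)
    && pvGeS v1 v2 n i
    && PySem.List.pyGetD good3 i false)

theorem pv_foldM (v1 v2 : List Int) (good3 : List Bool) (n : Int) :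
    ∀ (k : Nat) (a : Int), n - a ≤ (k : Int) →
    (PySem.List.pyRange a n 1).foldr (fun i s => pvStepM v1 v2 good3 n s i)
        (false, none, true) =
      (pvOkS v1 v2 good3 n a, pvMnS v1 n a, pvGeS v1 v2 n a) := by
  intro k
  induction k with
  | zero =>
      intro a ha
      have h : n ≤ a := by omega
      rw [PySem.List.pyRange_one_eq_nil h]
      simp [pvOkS, pvMnS, pvGeS, pvRunMin,
        PySem.List.pyRange_one_eq_nil h, PySem.List.pyRange_one_eq_nil (show n - 1 ≤ a by omega)]
  | succ k ih =>
      intro a ha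
      by_cases h : n ≤ a
      · rw [PySem.List.pyRange_one_eq_nil h]
        simp [pvOkS, pvMnS, pvGeS, pvRunMin,
          PySem.List.pyRange_one_eq_nil h, PySem.List.pyRange_one_eq_nil (show n - 1 ≤ a by omega)]
      · rw [Int.not_le] at h
        rw [PySem.List.pyRange_one_cons h, List.foldr_cons, ih (a + 1) (by omega)]
        have hge : (pvGeS v1 v2 n (a + 1)
            && decide (PySem.List.pyGetD v1 a 0 ≥ PySem.List.pyGetD v2 a 0))
            = pvGeS v1 v2 n a := by
          simp only [pvGeS]
          rw [PySem.List.pyRange_one_cons h, List.all_cons]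
          exact Bool.and_comm _ _
        have hmn : (some (match pvMnS v1 n (a + 1) with
              | none => PySem.List.pyGetD v1 a 0
              | some b => min b (PySem.List.pyGetD v1 a 0)) : Option Int)
            = pvMnS v1 n a := by
          simp only [pvMnS]
          rw [PySem.List.pyRange_one_cons h, List.map_cons]
          by_cases h2 : n ≤ a + 1
          · rw [PySem.List.pyRange_one_eq_nil h2]; rfl
          · rw [Int.not_le] at h2
            rw [PySem.List.pyRange_one_cons h2, List.map_cons]
            simp only [pvRunMin, List.foldl]
            rw [pv_foldl_min_comm]
        have hok : ∀ (c b : Bool), (if c then true else b) = (c || b) := by decide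
        simp only [pvStepM, hok]
        rw [hge, hmn]
        by_cases hc : a < n - 1
        · have : pvOkS v1 v2 good3 n a
              = ((decide (a < n - 1)
                  && decide (PySem.List.pyGetD v1 a 0 ≤ (pvMnS v1 n (a + 1)).getD 0)
                  && pvGeS v1 v2 n a
                  && PySem.List.pyGetD good3 a false) || pvOkS v1 v2 good3 n (a + 1)) := by
            simp only [pvOkS]
            rw [PySem.List.pyRange_one_cons hc, List.any_cons]
          rw [this]
        · have h1 : pvOkS v1 v2 good3 n a = false := by
            simp [pvOkS, PySem.List.pyRange_one_eq_nil (show n - 1 ≤ a by omega)]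
          have h2 : pvOkS v1 v2 good3 n (a + 1) = false := by
            simp [pvOkS, PySem.List.pyRange_one_eq_nil (show n - 1 ≤ a + 1 by omega)]
          simp [h1, h2, show ¬ (a < n - 1) by omega]

-- pointwise equality of A's per-index test with B's (inside the index range)
theorem pv_pointwise (v1 v2 : List Int) (n i : Int) (h0 : 0 ≤ i) (h1 : i < n - 1) :
    (((PySem.List.pyRange (i + 1) n 1).all (fun x =>
        decide (PySem.List.pyGetD v1 x 0 ≥ PySem.List.pyGetD v1 i 0)))
      && ((PySem.List.pyRange i n 1).all (fun x =>
        decide (PySem.List.pyGetD v1 x 0 ≥ PySem.List.pyGetD v2 x 0)))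
      && (PySem.List.max? (PySem.List.slice v1 (some i) none) (fun y => y)
          == some (PySem.List.pyGetD v1 (-1) 0)))
    = (decide (i < n - 1)
       && decide (PySem.List.pyGetD v1 i 0 ≤ (pvMnS v1 n (i + 1)).getD 0)
       && pvGeS v1 v2 n i
       && PySem.List.pyGetD (pvGrev (PySem.List.pyGetD v1 (-1) 0) v1) i false) := by
  have h3 : ((PySem.List.pyRange (i + 1) n 1).all (fun x =>
        decide (PySem.List.pyGetD v1 x 0 ≥ PySem.List.pyGetD v1 i 0)))
      = decide (PySem.List.pyGetD v1 i 0 ≤ (pvMnS v1 n (i + 1)).getD 0) := by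
    have hcons : PySem.List.pyRange (i + 1) n 1
        = (i + 1) :: PySem.List.pyRange (i + 1 + 1) n 1 :=
      PySem.List.pyRange_one_cons (by omega)
    rw [Bool.eq_iff_iff]
    simp only [List.all_eq_true, decide_eq_true_iff, ge_iff_le]
    rw [hcons]
    simp only [pvMnS, hcons, List.map_cons, pvRunMin, Option.getD_some]
    rw [pv_le_foldl_min_iff]
    simp only [List.mem_cons, List.mem_map]
    constructor
    · intro hall
      refine ⟨hall _ (Or.inl rfl), ?_⟩
      rintro y ⟨x, hx, rfl⟩
      exact hall x (Or.inr hx)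
    · rintro ⟨h1, h2⟩ x hx
      rcases hx with rfl | hx
      · exact h1
      · exact h2 _ ⟨x, hx, rfl⟩
  have h4 : (PySem.List.max? (PySem.List.slice v1 (some i) none) (fun y => y)
        == some (PySem.List.pyGetD v1 (-1) 0))
      = PySem.List.pyGetD (pvGrev (PySem.List.pyGetD v1 (-1) 0) v1) i false := by
    rw [show i = ((i.toNat : Nat) : Int) from (Int.toNat_of_nonneg h0).symm]
    rw [PySem.List.slice_from_natCast, PySem.List.pyGetD_natCast, pv_grev_getD]
    cases hdrop : v1.drop i.toNat with
    | nil => rfl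
    | cons a t =>
        rw [PySem.List.max?_id_cons]
        simp
  simp only [pvGeS]
  rw [h3, h4]
  simp [h1]

theorem pv_any_congr (l : List Int) (p q : Int → Bool)
    (h : ∀ x ∈ l, p x = q x) : l.any p = l.any q := by
  induction l with
  | nil => rfl
  | cons a t ih =>
      simp only [List.any_cons, h a (List.mem_cons_self ..),
        ih (fun x hx => h x (List.mem_cons_of_mem a hx))]

-- ===== VERDICT (by name: the statement is the Claim_ definition above) =====
theorem lh_cross_n_days_spec : Claim_equal_lh_cross_n_days := by
  intro v1 v2 n _ hpre
  unfold Spec_lh_cross_n_days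
  by_cases hn : n ≤ 1
  · simp [lh_cross_n_days, lh_cross_n_days_alt, hn,
      PySem.List.pyRange_one_eq_nil (show n - 1 ≤ 0 by omega)]
  · rw [Int.not_le] at hn
    simp only [lh_cross_n_days, lh_cross_n_days_alt, if_neg (show ¬ n ≤ 1 by omega)]
    rw [List.foldl_reverse, List.foldl_reverse]
    rw [pv_foldG]
    rw [pv_foldM v1 v2 _ n n.toNat 0 (by omega)]
    simp only [List.reverse_reverse, pvOkS]
    apply pv_any_congr
    intro i hi
    rw [PySem.List.mem_pyRange_one] at hi
    exact pv_pointwise v1 v2 n i hi.1 (by omega)
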